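-- pv_equiv track=rewrite | github.com/Murat666666/security-scanner | core/ai.py | analyze_vulnerabilities
-- ===== SOURCE A (Python) =====
-- def analyze_vulnerabilities(service, vulns):
--     if not vulns:
--         return "✔️ No vulnerabilities detected"
--
--     critical = [v for v in vulns if v["severity"] == "CRITICAL"]
--     high = [v for v in vulns if v["severity"] == "HIGH"]
--
--     if critical:
--         return f"🚨 Critical risk! {len(critical)} critical vulnerabilities"
--
--     if high:
--         return f"⚠️ High risk! {len(high)} high vulnerabilities"
--
--     return f"ℹ️ {len(vulns)} vulnerabilities found"
-- ===== SOURCE B (Python) =====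
-- _RANK = {"CRITICAL": 2, "HIGH": 1}
--
-- def analyze_vulnerabilities(service, vulns):
--     if not vulns:
--         return "✔️ No vulnerabilities detected"
--     # rank-table + max: pick the worst severity first, then count only that one
--     sevs = [v["severity"] for v in vulns]
--     worst = max(sevs, key=lambda s: _RANK.get(s, 0))
--     rank = _RANK.get(worst, 0)
--     if rank == 2:
--         return f"🚨 Critical risk! {sevs.count('CRITICAL')} critical vulnerabilities"
--     if rank == 1:
--         return f"⚠️ High risk! {sevs.count('HIGH')} high vulnerabilities"
--     return f"ℹ️ {len(vulns)} vulnerabilities found"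
-- ===== Notes on version B (the rewrite author's own statement) =====
-- stated objective: alternative
-- what changed: Instead of building A's two filtered lists and testing them for emptiness, B maps each vuln to a numeric rank via a severity table, selects the worst severity with max(key=rank), branches on that single rank, and counts only the one winning severity.
import Mathlib
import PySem

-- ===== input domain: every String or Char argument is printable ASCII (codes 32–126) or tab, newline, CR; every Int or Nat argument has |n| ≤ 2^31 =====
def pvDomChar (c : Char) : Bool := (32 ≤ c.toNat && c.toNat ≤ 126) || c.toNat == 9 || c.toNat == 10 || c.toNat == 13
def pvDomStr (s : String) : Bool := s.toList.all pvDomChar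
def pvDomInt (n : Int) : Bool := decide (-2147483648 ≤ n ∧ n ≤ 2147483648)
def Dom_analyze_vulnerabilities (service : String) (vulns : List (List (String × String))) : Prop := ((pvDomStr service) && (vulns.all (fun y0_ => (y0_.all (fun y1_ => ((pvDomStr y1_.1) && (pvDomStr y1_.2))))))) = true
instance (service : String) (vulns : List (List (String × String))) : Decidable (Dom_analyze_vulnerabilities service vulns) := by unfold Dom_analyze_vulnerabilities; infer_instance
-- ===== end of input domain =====

-- B replaces A's two filtered lists with a rank table + max(key=rank) selecting the worst severity, then counts only that severity; objective: alternative.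

-- v["severity"]: first-match lookup in the association list (KeyError = none, excluded by Pre_)
def pvSeverity (v : List (String × String)) : String :=
  ((PySem.Dict.mk v).get? "severity").getD ""

-- ===== PORT A =====
def analyze_vulnerabilities (service : String) (vulns : List (List (String × String))) : String :=
  if vulns = [] then "✔️ No vulnerabilities detected"
  else
    let critical := vulns.filter (fun v => pvSeverity v == "CRITICAL")
    let high := vulns.filter (fun v => pvSeverity v == "HIGH")
    if critical ≠ [] then
      "🚨 Critical risk! " ++ PySem.Int.toStr (critical.length : Int) ++ " critical vulnerabilities"
    else if high ≠ [] then
      "⚠️ High risk! " ++ PySem.Int.toStr (high.length : Int) ++ " high vulnerabilities"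
    else
      "ℹ️ " ++ PySem.Int.toStr (vulns.length : Int) ++ " vulnerabilities found"

-- ===== PORT B =====
-- the module-level _RANK table
def pvRANK : PySem.Dict String Int := PySem.Dict.mk [("CRITICAL", 2), ("HIGH", 1)]

def analyze_vulnerabilities_alt (service : String) (vulns : List (List (String × String))) : String :=
  if vulns = [] then "✔️ No vulnerabilities detected"
  else
    let sevs := vulns.map pvSeverity
    -- max(sevs, key=…): first maximal element; sevs is nonempty here, getD "" is a totality guard
    let worst := (PySem.List.max? sevs (fun s => pvRANK.getD s 0)).getD ""
    let rank := pvRANK.getD worst 0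
    if rank = 2 then
      "🚨 Critical risk! " ++ PySem.Int.toStr (PySem.List.count sevs "CRITICAL" : Int) ++ " critical vulnerabilities"
    else if rank = 1 then
      "⚠️ High risk! " ++ PySem.Int.toStr (PySem.List.count sevs "HIGH" : Int) ++ " high vulnerabilities"
    else
      "ℹ️ " ++ PySem.Int.toStr (vulns.length : Int) ++ " vulnerabilities found"

-- ===== PRECONDITION & SPEC =====
-- Pre_ excludes exactly the inputs where Python raises KeyError: some vuln lacks a "severity" key.
def Pre_analyze_vulnerabilities (service : String) (vulns : List (List (String × String))) : Prop :=
  ∀ v ∈ vulns, (PySem.Dict.mk v).contains "severity" = true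
instance (service : String) (vulns : List (List (String × String))) : Decidable (Pre_analyze_vulnerabilities service vulns) := by unfold Pre_analyze_vulnerabilities; infer_instance

def pvWitness_analyze_vulnerabilities : String × (List (List (String × String))) :=
  ("ssh", [[("severity", "HIGH")], [("severity", "LOW")]])

def Spec_analyze_vulnerabilities (service : String) (vulns : List (List (String × String))) (out : String) : Prop := out = analyze_vulnerabilities_alt service vulns
instance (service : String) (vulns : List (List (String × String))) (out : String) : Decidable (Spec_analyze_vulnerabilities service vulns out) := by unfold Spec_analyze_vulnerabilities; infer_instance

-- ===== CLAIM (what is proved, stated in full; the proofs are below) =====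
def Claim_equal_analyze_vulnerabilities : Prop := ∀ (service : String) (vulns : List (List (String × String))), Dom_analyze_vulnerabilities service vulns → Pre_analyze_vulnerabilities service vulns → Spec_analyze_vulnerabilities service vulns (analyze_vulnerabilities service vulns)

-- ===== LEMMAS AND PROOFS =====

theorem pvRank_getD (s : String) :
    pvRANK.getD s 0 = if s = "CRITICAL" then 2 else if s = "HIGH" then 1 else 0 := by
  by_cases h1 : s = "CRITICAL"
  · subst h1; decide
  · by_cases h2 : s = "HIGH"
    · subst h2; decide
    · have b1 : ("CRITICAL" == s) = false := by simp [beq_iff_eq]; exact fun h => h1 h.symm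
      have b2 : ("HIGH" == s) = false := by simp [beq_iff_eq]; exact fun h => h2 h.symm
      simp [pvRANK, PySem.Dict.getD, PySem.Dict.get?, PySem.Dict.mk, List.find?, b1, b2, h1, h2]

theorem pvRank_le_two (s : String) : pvRANK.getD s 0 ≤ 2 := by
  rw [pvRank_getD]; split_ifs <;> omega

theorem pvRank_eq_two (s : String) (h : pvRANK.getD s 0 = 2) : s = "CRITICAL" := by
  rw [pvRank_getD] at h; split_ifs at h with a b
  · exact a
  · omega
  · omega

theorem pvRank_eq_one (s : String) (h : pvRANK.getD s 0 = 1) : s = "HIGH" := by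
  rw [pvRank_getD] at h; split_ifs at h with a b
  · omega
  · exact b
  · omega

theorem pv_count_eq (vulns : List (List (String × String))) (k : String) :
    List.count k (vulns.map pvSeverity) = (vulns.filter (fun v => pvSeverity v == k)).length := by
  rw [List.count_eq_countP, ← List.countP_eq_length_filter, List.countP_map]
  rfl

theorem pv_filter_nil_iff (vulns : List (List (String × String))) (k : String) :
    vulns.filter (fun v => pvSeverity v == k) = [] ↔ k ∉ vulns.map pvSeverity := by
  rw [List.filter_eq_nil_iff]
  simp only [List.mem_map, not_exists, not_and, beq_iff_eq]

theorem analyze_vulnerabilities_eq (service : String) (vulns : List (List (String × String))) :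
    analyze_vulnerabilities service vulns = analyze_vulnerabilities_alt service vulns := by
  unfold analyze_vulnerabilities analyze_vulnerabilities_alt
  by_cases hnil : vulns = []
  · simp [hnil]
  · simp only [if_neg hnil]
    have hsne : vulns.map pvSeverity ≠ [] := by simpa using hnil
    obtain ⟨m, hm⟩ : ∃ m, PySem.List.max? (vulns.map pvSeverity) (fun s => pvRANK.getD s 0) = some m := by
      cases h : PySem.List.max? (vulns.map pvSeverity) (fun s => pvRANK.getD s 0) with
      | none => exact absurd ((PySem.List.max?_eq_none_iff _ _).mp h) hsne
      | some m => exact ⟨m, rfl⟩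
    have hmem : m ∈ vulns.map pvSeverity := PySem.List.max?_mem hm
    have hmax : ∀ y ∈ vulns.map pvSeverity, pvRANK.getD y 0 ≤ pvRANK.getD m 0 :=
      PySem.List.max?_isMax hm
    rw [hm]
    simp only [Option.getD_some]
    by_cases hC : "CRITICAL" ∈ vulns.map pvSeverity
    · have h2 : pvRANK.getD m 0 = 2 := by
        have hle := hmax _ hC
        have : pvRANK.getD "CRITICAL" 0 = 2 := by decide
        have := pvRank_le_two m
        omega
      have hcritne : vulns.filter (fun v => pvSeverity v == "CRITICAL") ≠ [] := by
        rw [Ne, pv_filter_nil_iff]; exact not_not.mpr hC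
      simp [hcritne, h2, PySem.List.count, pv_count_eq]
    · have hcrit : vulns.filter (fun v => pvSeverity v == "CRITICAL") = [] := by
        rw [pv_filter_nil_iff]; exact hC
      have hm2 : pvRANK.getD m 0 ≠ 2 := fun h => hC (pvRank_eq_two m h ▸ hmem)
      by_cases hH : "HIGH" ∈ vulns.map pvSeverity
      · have h1 : pvRANK.getD m 0 = 1 := by
          have hle := hmax _ hH
          have : pvRANK.getD "HIGH" 0 = 1 := by decide
          have := pvRank_le_two m
          omega
        have hhighne : vulns.filter (fun v => pvSeverity v == "HIGH") ≠ [] := by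
          rw [Ne, pv_filter_nil_iff]; exact not_not.mpr hH
        simp [hcrit, hhighne, hm2, h1, PySem.List.count, pv_count_eq]
      · have h0 : pvRANK.getD m 0 = 0 := by
          have := pvRank_le_two m
          have hm1 : pvRANK.getD m 0 ≠ 1 := fun h => hH (pvRank_eq_one m h ▸ hmem)
          rw [pvRank_getD] at this hm1 ⊢
          rw [pvRank_getD] at hm2
          split_ifs at hm2 hm1 ⊢ <;> omega
        have hhigh : vulns.filter (fun v => pvSeverity v == "HIGH") = [] := by
          rw [pv_filter_nil_iff]; exact hH
        simp [hcrit, hhigh, h0]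

-- ===== VERDICT (by name: the statement is the Claim_ definition above) =====
theorem analyze_vulnerabilities_spec : Claim_equal_analyze_vulnerabilities := by
  intro service vulns _ _
  unfold Spec_analyze_vulnerabilities
  exact analyze_vulnerabilities_eq service vulns
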